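-- pv_equiv track=rewrite | github.com/bhupendrav16/Birthday_automessage | baseproject/birthday/date_convertion.py | change_date
-- ===== SOURCE A (Python) =====
-- def change_date(today):
--     today = today[::-1]
--     i = 0
--     j = 0
--     new_today =""
--     while ( j < len(today)):
--         if ( today[j] == '-'):
--             for k in range(j-1,i-1,-1):
--                 new_today += today[k]
--             new_today += '-'
--             i = j +1
--             j += 1
--         else:
--             j+=1
--     for k in range( j-1,i-1,-1):
--         new_today += today[k]
--     today = new_today
--
--     return today
-- ===== SOURCE B (Python) =====
-- def change_date(today):
--     return '-'.join(today.split('-')[::-1])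
-- ===== Notes on version B (the rewrite author's own statement) =====
-- stated objective: idiomatic
-- what changed: Replaces the char-by-char index walk over the reversed string (with an inner backwards range copying each segment character by character into a growing string) by splitting on the dash separator, reversing the list of segments and rejoining; this avoids quadratic string concatenation.
import Mathlib
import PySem

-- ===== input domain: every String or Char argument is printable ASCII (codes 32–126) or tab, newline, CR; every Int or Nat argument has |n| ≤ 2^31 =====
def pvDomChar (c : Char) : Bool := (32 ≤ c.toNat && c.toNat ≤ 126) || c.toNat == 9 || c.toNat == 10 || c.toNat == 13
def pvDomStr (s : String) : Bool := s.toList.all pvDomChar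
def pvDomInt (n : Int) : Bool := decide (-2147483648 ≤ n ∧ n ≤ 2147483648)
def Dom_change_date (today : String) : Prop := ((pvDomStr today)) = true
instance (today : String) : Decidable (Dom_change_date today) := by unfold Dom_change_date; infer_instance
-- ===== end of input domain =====

-- B reverses the dash-separated segments by split/reverse/join instead of A's
-- char-by-char index walk over the reversed string; objective: idiomatic.

-- ===== PORT A =====
-- the inner 'for k in range(j-1, i-1, -1): new_today += today[k]'
def changeInnerA (t : List Char) (i j : Nat) : List Char :=
  (PySem.List.pyRange ((j : Int) - 1) ((i : Int) - 1) (-1)).map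
    (fun k => PySem.List.pyGetD t k ' ')

-- the 'while (j < len(today)): …' loop; state (i, j, new_today)
def changeLoopA (t : List Char) (i j : Nat) (acc : List Char) : Nat × Nat × List Char :=
  if h : j < t.length then
    if PySem.List.pyGetD t (j : Int) ' ' = '-' then
      changeLoopA t (j + 1) (j + 1) (acc ++ changeInnerA t i j ++ ['-'])
    else
      changeLoopA t i (j + 1) acc
  else (i, j, acc)
termination_by t.length - j

def change_date (today : String) : String :=
  let t := (PySem.List.slice? today.toList none none (-1)).getD []   -- today[::-1]
  match changeLoopA t 0 0 [] with
  | (i, j, acc) => String.ofList (acc ++ changeInnerA t i j)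

-- ===== PORT B =====
def change_date_alt (today : String) : String :=
  let parts := (PySem.Str.split? today "-").getD []                  -- today.split('-')
  PySem.Str.join "-" ((PySem.List.slice? parts none none (-1)).getD [])  -- '-'.join(…[::-1])

-- ===== PRECONDITION & SPEC =====
def Spec_change_date (today : String) (out : String) : Prop := out = change_date_alt today
instance (today : String) (out : String) : Decidable (Spec_change_date today out) := by unfold Spec_change_date; infer_instance

-- ===== CLAIM (what is proved, stated in full; the proofs are below) =====
def Claim_equal_change_date : Prop := ∀ (today : String), Dom_change_date today → Spec_change_date today (change_date today)

-- ===== LEMMAS AND PROOFS =====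

-- split on '-' as a structural recursion (proof-side spec, related to PySem.Chars.splitOn below)
def partsD : List Char → List (List Char)
  | [] => [[]]
  | c :: r => if c = '-' then [] :: partsD r else consAllD [c] (partsD r)
where
  consAllD (p : List Char) : List (List Char) → List (List Char)
    | [] => [p]
    | q :: qs => (p ++ q) :: qs

theorem partsD_ne_nil (cs : List Char) : partsD cs ≠ [] := by
  cases cs with
  | nil => simp [partsD]
  | cons c r =>
    simp only [partsD]
    split
    · simp
    · cases h : partsD r <;> simp [partsD.consAllD]

theorem consAllD_consAllD (a b : List Char) (L : List (List Char)) :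
    partsD.consAllD a (partsD.consAllD b L) = partsD.consAllD (a ++ b) L := by
  cases L <;> simp [partsD.consAllD]

-- PySem.Chars.splitOn.go on separator "-" computes partsD
theorem go_eq_partsD (fuel : Nat) (l cur : List Char) (acc : List (List Char))
    (hf : l.length < fuel) :
    PySem.Chars.splitOn.go ['-'] fuel l cur acc
      = acc.reverse ++ partsD.consAllD cur.reverse (partsD l) := by
  induction fuel generalizing l cur acc with
  | zero => omega
  | succ fuel ih =>
    cases l with
    | nil => simp [PySem.Chars.splitOn.go, partsD, partsD.consAllD]
    | cons c rest =>
      simp only [PySem.Chars.splitOn.go]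
      by_cases hc : c = '-'
      · subst hc
        have hp : List.isPrefixOf ['-'] ('-' :: rest) = true := by
          simp [List.isPrefixOf]
        rw [if_pos hp]
        simp only [List.length_cons] at hf
        rw [ih _ _ _ (by simpa using Nat.lt_of_succ_lt_succ hf)]
        cases hr : partsD rest with
        | nil => exact absurd hr (partsD_ne_nil rest)
        | cons q qs => simp [partsD, partsD.consAllD, hr]
      · have hp : List.isPrefixOf ['-'] (c :: rest) = false := by
          simp [List.isPrefixOf]
          exact fun h => (hc h.symm).elim
        rw [if_neg (by simp [hp])]
        simp only [List.length_cons] at hf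
        rw [ih _ _ _ (Nat.lt_of_succ_lt_succ hf)]
        simp [partsD, hc, consAllD_consAllD]

theorem splitOn_eq_partsD (cs : List Char) :
    PySem.Chars.splitOn cs ['-'] = partsD cs := by
  have := go_eq_partsD (cs.length + 1) cs [] [] (by omega)
  simpa [PySem.Chars.splitOn, partsD.consAllD, partsD_ne_nil] using this.trans (by
    cases h : partsD cs with
    | nil => exact absurd h (partsD_ne_nil cs)
    | cons p ps => simp [partsD.consAllD])

-- the segment copied by the inner for-loop is t[i:j] reversed
theorem changeInnerA_eq (t : List Char) (i j : Nat) (hij : i ≤ j) (hj : j ≤ t.length) :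
    changeInnerA t i j = ((t.drop i).take (j - i)).reverse := by
  unfold changeInnerA
  rw [PySem.List.pyRange_neg_one_eq_reverse]
  have h2 : ((i : Int) - 1 + 1) = (i : Int) := by omega
  have h3 : ((j : Int) - 1 + 1) = (j : Int) := by omega
  rw [h2, h3, List.map_reverse]
  congr 1
  -- map pyGetD over pyRange i j = (t.drop i).take (j - i)
  have hsplit : PySem.List.pyRange (i : Int) (PySem.List.len t)
      = PySem.List.pyRange (i : Int) (j : Int) ++ PySem.List.pyRange (j : Int) (PySem.List.len t) := by
    apply PySem.List.pyRange_one_append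
    · exact_mod_cast hij
    · simp [PySem.List.len_eq]; exact_mod_cast hj
  have hmap2 := PySem.List.map_pyGetD_pyRange t ' ' (a := (j : Int)) (by positivity)
  -- derive the equality by cancelling the common suffix
  have key : List.map (fun k => PySem.List.pyGetD t k ' ') (PySem.List.pyRange (i:Int) (j:Int))
      ++ t.drop j = t.drop i := by
    have := PySem.List.map_pyGetD_pyRange t ' ' (a := (i : Int)) (by positivity)
    rw [hsplit, List.map_append] at this
    rw [hmap2] at this
    simpa using this
  have hdecomp : (t.drop i).take (j - i) ++ t.drop j = t.drop i := by
    conv_rhs => rw [← List.take_append_drop (j - i) (t.drop i)]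
    congr 1
    rw [List.drop_drop]
    congr 1
    omega
  exact List.append_cancel_right (key.trans hdecomp.symm)

-- structural spec of the main while loop
def gA (p : List Char) : List Char → List Char
  | [] => p.reverse
  | c :: r => if c = '-' then p.reverse ++ '-' :: gA [] r else gA (p ++ [c]) r

theorem changeLoopA_eq (t : List Char) (n i j : Nat) (acc : List Char)
    (hij : i ≤ j) (hj : j ≤ t.length) (hn : t.length - j = n) :
    (match changeLoopA t i j acc with
     | (i', j', acc') => acc' ++ changeInnerA t i' j')
      = acc ++ gA ((t.drop i).take (j - i)) (t.drop j) := by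
  induction n generalizing i j acc with
  | zero =>
    have hjl : j = t.length := by omega
    rw [changeLoopA]
    rw [dif_neg (by omega)]
    simp only
    rw [changeInnerA_eq t i j hij hj]
    subst hjl
    simp [gA]
  | succ n ih =>
    have hjl : j < t.length := by omega
    have hdrop : t.drop j = t[j] :: t.drop (j + 1) := List.drop_eq_getElem_cons hjl
    have hget : PySem.List.pyGetD t (j : Int) ' ' = t[j] := by
      simp [PySem.List.pyGetD_natCast, List.getD_eq_getElem?_getD, hjl]
    rw [changeLoopA, dif_pos hjl]
    by_cases hc : t[j] = '-'
    · rw [if_pos (hget.trans hc)]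
      rw [ih (j + 1) (j + 1) _ (le_refl _) (by omega) (by omega)]
      rw [changeInnerA_eq t i j hij (le_of_lt hjl)]
      simp [hdrop, gA, hc]
    · rw [if_neg (fun h => hc (hget.symm.trans h))]
      rw [ih i (j + 1) acc (by omega) (by omega) (by omega)]
      rw [hdrop]
      simp only [gA, if_neg hc]
      congr 2
      have : j + 1 - i = (j - i) + 1 := by omega
      rw [this, List.take_add_one]
      congr 1
      have hlt : j - i < (t.drop i).length := by simp [List.length_drop]; omega
      rw [List.getElem?_eq_getElem hlt]
      simp [List.getElem_drop]
      congr 1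
      omega

-- gA joins the reversed parts
theorem gA_eq_join (r p : List Char) :
    gA p r = PySem.Chars.join ['-'] ((partsD.consAllD p (partsD r)).map List.reverse) := by
  induction r generalizing p with
  | nil => simp [gA, partsD, partsD.consAllD, PySem.Chars.join, List.intercalate]
  | cons c r ih =>
    by_cases hc : c = '-'
    · subst hc
      simp only [gA, reduceIte, partsD, partsD.consAllD]
      rw [ih []]
      have hne : partsD r ≠ [] := partsD_ne_nil r
      cases h : partsD r with
      | nil => exact absurd h hne
      | cons q qs =>
        simp [partsD.consAllD, PySem.Chars.join, List.intercalate]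
    · simp only [gA, partsD, if_neg hc]
      rw [ih (p ++ [c]), consAllD_consAllD]

-- partsD turns reversal of the input into reversal (and elementwise reversal) of the parts
def snocLastD : List (List Char) → Char → List (List Char)
  | [], c => [[c]]
  | [p], c => [p ++ [c]]
  | p :: q :: ps, c => p :: snocLastD (q :: ps) c

theorem partsD_append_dash (xs : List Char) :
    partsD (xs ++ ['-']) = partsD xs ++ [[]] := by
  induction xs with
  | nil => simp [partsD]
  | cons x xs ih =>
    by_cases hx : x = '-'
    · simp [partsD, hx, ih]
    · simp only [List.cons_append, partsD, if_neg hx, ih]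
      have hne : partsD xs ≠ [] := partsD_ne_nil xs
      cases h : partsD xs with
      | nil => exact absurd h hne
      | cons q qs => simp [partsD.consAllD]

theorem consAllD_snocLastD (a : List Char) (L : List (List Char)) (c : Char) (hL : L ≠ []) :
    partsD.consAllD a (snocLastD L c) = snocLastD (partsD.consAllD a L) c := by
  cases L with
  | nil => exact absurd rfl hL
  | cons p ps =>
    cases ps with
    | nil => simp [snocLastD, partsD.consAllD, List.append_assoc]
    | cons q qs => simp [snocLastD, partsD.consAllD]

theorem partsD_append_char (xs : List Char) (c : Char) (hc : c ≠ '-') :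
    partsD (xs ++ [c]) = snocLastD (partsD xs) c := by
  induction xs with
  | nil => simp [partsD, hc, snocLastD, partsD.consAllD]
  | cons x xs ih =>
    by_cases hx : x = '-'
    · simp only [List.cons_append, partsD, if_pos hx, ih]
      have hne : partsD xs ≠ [] := partsD_ne_nil xs
      cases h : partsD xs with
      | nil => exact absurd h hne
      | cons q qs => simp [snocLastD]
    · simp only [List.cons_append, partsD, if_neg hx, ih]
      exact consAllD_snocLastD [x] (partsD xs) c (partsD_ne_nil xs)

theorem snocLastD_append_singleton (xs : List (List Char)) (p : List Char) (c : Char) :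
    snocLastD (xs ++ [p]) c = xs ++ [p ++ [c]] := by
  induction xs with
  | nil => simp [snocLastD]
  | cons q qs ih =>
    cases qs with
    | nil => simp [snocLastD]
    | cons r rs => simpa [snocLastD] using ih

theorem partsD_reverse (cs : List Char) :
    (partsD cs.reverse).map List.reverse = (partsD cs).reverse := by
  induction cs with
  | nil => simp [partsD]
  | cons c cs ih =>
    by_cases hc : c = '-'
    · subst hc
      simp only [List.reverse_cons, partsD_append_dash, partsD]
      simp [ih]
    · simp only [List.reverse_cons, partsD_append_char cs.reverse c hc, partsD, if_neg hc]
      have hM : partsD cs ≠ [] := partsD_ne_nil cs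
      cases hMs : partsD cs with
      | nil => exact absurd hMs hM
      | cons m ms =>
        have hrev : partsD cs.reverse = (List.map List.reverse (m :: ms)).reverse := by
          have : (partsD cs.reverse).map List.reverse = (m :: ms).reverse := by rw [ih, hMs]
          calc partsD cs.reverse
              = ((partsD cs.reverse).map List.reverse).map List.reverse := by
                simp [List.map_map]
            _ = (List.map List.reverse (m :: ms)).reverse := by
                rw [this]; simp [List.map_reverse]
        rw [hrev]
        simp only [List.map_cons, List.reverse_cons]
        rw [snocLastD_append_singleton]
        simp [partsD.consAllD, List.map_reverse, List.map_map]

-- ===== VERDICT (by name: the statement is the Claim_ definition above) =====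
theorem change_date_spec : Claim_equal_change_date := by
  intro today _
  unfold Spec_change_date change_date change_date_alt
  simp only [PySem.List.slice?_none_none_neg_one]
  simp only [Option.getD_some]
  have hA := changeLoopA_eq today.toList.reverse (today.toList.reverse.length) 0 0 []
    (le_refl 0) (by omega) (by omega)
  rcases hL : changeLoopA today.toList.reverse 0 0 [] with ⟨i, j, acc⟩
  rw [hL] at hA
  simp only at hA
  rw [hA]
  -- A's output
  have hacons : partsD.consAllD [] (partsD today.toList.reverse) = partsD today.toList.reverse := by
    cases h : partsD today.toList.reverse with
    | nil => exact absurd h (partsD_ne_nil _)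
    | cons q qs => simp [partsD.consAllD]
  rw [List.drop_zero, List.take_zero, List.nil_append, gA_eq_join, hacons, partsD_reverse]
  -- B's output
  have hsplit : PySem.Str.split? today "-"
      = some ((PySem.Chars.splitOn today.toList ['-']).map String.ofList) := by
    have h := PySem.Str.split?_map today "-"
    simp only [PySem.Chars.split?] at h
    rcases hq : PySem.Str.split? today "-" with _ | parts
    · rw [hq, if_neg (by decide)] at h; simp at h
    · rw [hq, if_neg (by decide)] at h
      simp only [Option.map_some] at h
      have hparts : parts.map String.toList = PySem.Chars.splitOn today.toList "-".toList := by
        exact Option.some.inj h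
      congr 1
      have : "-".toList = ['-'] := rfl
      rw [this] at hparts
      rw [← hparts]
      simp [List.map_map, Function.comp_def, String.ofList_toList]
  rw [hsplit]
  simp only [Option.getD_some]
  apply String.toList_injective
  rw [String.toList_ofList, PySem.Str.toList_join]
  rw [← List.map_reverse, List.map_map]
  simp [Function.comp_def, String.toList_ofList, splitOn_eq_partsD]
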